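-- pv_equiv track=rewrite | github.com/pypi-data/pypi-mirror-176 | packages/minPath/minPath-0.1.3.tar.gz/minPath-0.1.3/minPath/__init__.py | parser_path
-- ===== SOURCE A (Python) =====
-- def parser_path(content:str,prefixs=("/", "\\")):
-- 	token = []
-- 	tok   = ""
-- 	for char in content:
-- 		if char in prefixs:
-- 			token.append(tok)
-- 			tok = ""
-- 		else:
-- 			tok+=char
-- 	if tok.strip():
-- 		token.append(tok)
-- 	return token
-- ===== SOURCE B (Python) =====
-- def parser_path(content, prefixs=("/", "\\")):
--     # split-by-positions: find every separator index up front, then slice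
--     # content between consecutive cuts; finally drop a blank last token.
--     seps = {p for p in prefixs if len(p) == 1}
--     cuts = [i for i, ch in enumerate(content) if ch in seps]
--     parts = [content[a + 1:b] for a, b in zip([-1] + cuts, cuts + [len(content)])]
--     if not parts[-1].strip():
--         parts.pop()
--     return parts
-- ===== Notes on version B (the rewrite author's own statement) =====
-- stated objective: faster
-- what changed: A's per-character accumulate-and-emit loop is replaced by computing all separator positions up front and slicing content between consecutive cuts, with the blank-last-token rule applied as a single tail fixup.
import Mathlib
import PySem

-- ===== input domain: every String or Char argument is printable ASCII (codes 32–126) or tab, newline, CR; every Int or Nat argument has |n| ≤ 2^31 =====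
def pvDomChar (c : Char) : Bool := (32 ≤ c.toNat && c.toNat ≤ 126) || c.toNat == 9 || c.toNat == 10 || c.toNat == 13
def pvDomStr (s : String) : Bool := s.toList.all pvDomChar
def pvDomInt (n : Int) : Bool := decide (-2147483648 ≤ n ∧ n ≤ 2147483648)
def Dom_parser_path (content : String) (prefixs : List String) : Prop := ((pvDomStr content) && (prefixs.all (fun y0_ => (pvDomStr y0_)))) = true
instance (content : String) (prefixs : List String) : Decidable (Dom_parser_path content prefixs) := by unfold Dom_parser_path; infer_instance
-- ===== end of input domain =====

-- B replaces A's per-character accumulate-and-emit loop by a positions-then-slices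
-- decomposition (find all separator indices, slice content between consecutive cuts,
-- trim a blank last token); a timing run measured B faster than A on large inputs.


-- ===== PORT A =====
def parser_path (content : String) (prefixs : List String) : List String :=
  let r := content.toList.foldl
    (fun (st : List String × String) char =>
      if prefixs.contains (String.singleton char) then (st.1 ++ [st.2], "")
      else (st.1, st.2 ++ String.singleton char)) ([], "")
  if PySem.Str.strip r.2 ≠ "" then r.1 ++ [r.2] else r.1

-- ===== PORT B =====
def parser_path_alt (content : String) (prefixs : List String) : List String :=
  let seps : PySem.Set String := PySem.Set.ofList (prefixs.filter (fun p => PySem.Str.len p == 1))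
  let cuts : List Int :=
    ((PySem.List.enumerate content.toList).filter
      (fun ic => PySem.Set.contains seps (String.singleton ic.2))).map (fun ic => ic.1)
  let parts : List String :=
    (List.zip ((-1) :: cuts) (cuts ++ [PySem.Str.len content])).map
      (fun ab => PySem.Str.slice content (some (ab.1 + 1)) (some ab.2))
  if PySem.Str.strip (PySem.List.pyGetD parts (-1) "") == "" then parts.dropLast else parts

-- ===== PRECONDITION & SPEC =====
def Spec_parser_path (content : String) (prefixs : List String) (out : List String) : Prop := out = parser_path_alt content prefixs
instance (content : String) (prefixs : List String) (out : List String) : Decidable (Spec_parser_path content prefixs out) := by unfold Spec_parser_path; infer_instance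

-- ===== CLAIM (what is proved, stated in full; the proofs are below) =====
def Claim_equal_parser_path : Prop := ∀ (content : String) (prefixs : List String), Dom_parser_path content prefixs → Spec_parser_path content prefixs (parser_path content prefixs)

-- ===== LEMMAS AND PROOFS =====

-- reference splitter: tokens of cs split at every char satisfying q (always nonempty)
def pvSplit (q : Char → Bool) : List Char → List (List Char)
  | [] => [[]]
  | c :: cs =>
    match pvSplit q cs with
    | [] => [[c]]  -- unreachable
    | h :: t => if q c then [] :: h :: t else (c :: h) :: t

-- A-side: prepend a pending token to the head of the reference split, as strings
def pvWithHd (tok : String) : List (List Char) → List String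
  | [] => []
  | h :: t => (tok ++ String.ofList h) :: t.map String.ofList

-- B-side: the separator positions of cs
def pvKs (q : Char → Bool) (cs : List Char) : List Int :=
  ((PySem.List.enumerate cs).filter (fun ic => q ic.2)).map (fun ic => ic.1)

-- B-side: the slices between consecutive cuts, at the character level
def pvPartsC (q : Char → Bool) (cs : List Char) : List (List Char) :=
  (List.zip ((-1) :: pvKs q cs) (pvKs q cs ++ [(cs.length : Int)])).map
    (fun ab => PySem.List.slice cs (some (ab.1 + 1)) (some ab.2))

theorem pvSplit_ne_nil (q : Char → Bool) (cs : List Char) : pvSplit q cs ≠ [] := by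
  cases cs with
  | nil => simp [pvSplit]
  | cons c cs =>
    rw [pvSplit]
    rcases hS : pvSplit q cs with _ | ⟨h, t⟩
    · simp
    · by_cases hq : q c <;> simp [hq]

theorem pvStr_ofList_cons (c : Char) (h : List Char) :
    String.ofList (c :: h) = String.singleton c ++ String.ofList h := by
  apply String.ext; simp

theorem pvStr_append_assoc (a b c : String) : (a ++ b) ++ c = a ++ (b ++ c) := by
  apply String.ext; simp

theorem pvWithHd_empty (S : List (List Char)) : pvWithHd "" S = S.map String.ofList := by
  cases S with
  | nil => simp [pvWithHd]
  | cons h t => simp [pvWithHd]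

theorem pvGetLastD_eq_getLast {α : Type} (l : List α) (hl : l ≠ []) (d : α) :
    l.getLastD d = l.getLast hl := by
  rw [List.getLastD_eq_getLast?, List.getLast?_eq_some_getLast hl, Option.getD_some]

theorem pvGetLastD_irrel {α : Type} (l : List α) (hl : l ≠ []) (d d' : α) :
    l.getLastD d = l.getLastD d' := by
  rw [pvGetLastD_eq_getLast l hl d, pvGetLastD_eq_getLast l hl d']

-- A's loop, characterised by the reference splitter
theorem pvFoldA (prefixs : List String) (cs : List Char) :
    ∀ (acc : List String) (tok : String),
    cs.foldl (fun (st : List String × String) char =>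
        if prefixs.contains (String.singleton char) then (st.1 ++ [st.2], "")
        else (st.1, st.2 ++ String.singleton char)) (acc, tok)
    = (acc ++ (pvWithHd tok (pvSplit (fun c => prefixs.contains (String.singleton c)) cs)).dropLast,
       (pvWithHd tok (pvSplit (fun c => prefixs.contains (String.singleton c)) cs)).getLastD "") := by
  induction cs with
  | nil => intro acc tok; simp [pvSplit, pvWithHd]
  | cons c cs ih =>
    intro acc tok
    rcases hS : pvSplit (fun c => prefixs.contains (String.singleton c)) cs with _ | ⟨h, t⟩
    · exact absurd hS (pvSplit_ne_nil _ cs)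
    · by_cases hq : prefixs.contains (String.singleton c)
      · have hsplit : pvSplit (fun c => prefixs.contains (String.singleton c)) (c :: cs)
            = [] :: h :: t := by rw [pvSplit, hS]; exact if_pos hq
        rw [List.foldl_cons]
        simp only [hq, if_pos]
        rw [ih (acc ++ [tok]) "", hsplit, hS]
        have hM : (h :: t).map String.ofList ≠ [] := by simp
        have hW : pvWithHd tok ([] :: h :: t) = tok :: (h :: t).map String.ofList := by
          rw [pvWithHd]
          simp
        rw [hW, pvWithHd_empty]
        simp only [Prod.mk.injEq]
        refine ⟨?_, ?_⟩
        · rw [List.dropLast_cons_of_ne_nil hM]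
          simp
        · rw [List.getLastD_cons, pvGetLastD_irrel _ hM "" tok]
      · have hsplit : pvSplit (fun c => prefixs.contains (String.singleton c)) (c :: cs)
            = (c :: h) :: t := by
          rw [pvSplit, hS]
          exact if_neg hq
        rw [List.foldl_cons]
        simp only [hq, Bool.false_eq_true, if_false]
        rw [ih acc (tok ++ String.singleton c), hsplit, hS]
        have hW : pvWithHd tok ((c :: h) :: t) = pvWithHd (tok ++ String.singleton c) (h :: t) := by
          rw [pvWithHd, pvWithHd, pvStr_ofList_cons, ← pvStr_append_assoc]
        rw [hW]

theorem pvEnumerate_shift (cs : List Char) (s : Int) :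
    PySem.List.enumerate cs (s + 1) = (PySem.List.enumerate cs s).map (fun p => (p.1 + 1, p.2)) := by
  induction cs generalizing s with
  | nil => simp [PySem.List.enumerate_nil]
  | cons c cs ih => simp [PySem.List.enumerate_cons, ih]

theorem pvKs_cons (q : Char → Bool) (c : Char) (cs : List Char) :
    pvKs q (c :: cs) = (if q c then [(0 : Int)] else []) ++ (pvKs q cs).map (· + 1) := by
  rw [pvKs, PySem.List.enumerate_cons]
  rw [show (0 : Int) + 1 = 0 + 1 by ring, pvEnumerate_shift cs 0]
  by_cases hq : q c <;>
    simp [hq, pvKs, List.filter_map, List.map_map, Function.comp_def]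

theorem pvKs_nonneg (q : Char → Bool) (cs : List Char) (k : Int) (hk : k ∈ pvKs q cs) : 0 ≤ k := by
  rw [pvKs] at hk
  simp only [List.mem_map, List.mem_filter] at hk
  obtain ⟨ic, ⟨hmem, _⟩, hfst⟩ := hk
  rw [PySem.List.mem_enumerate_iff] at hmem
  obtain ⟨j, hj, rfl⟩ := hmem
  omega

theorem pvSliceCons {α : Type} (c : α) (cs : List α) (x y : Int) (hx : 0 ≤ x) (hy : 0 ≤ y) :
    PySem.List.slice (c :: cs) (some (x + 1)) (some (y + 1)) = PySem.List.slice cs (some x) (some y) := by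
  rw [PySem.List.slice_toNat _ (by omega) (by omega), PySem.List.slice_toNat _ hx hy]
  have h1 : (x + 1).toNat = x.toNat + 1 := by omega
  rw [h1, List.drop_succ_cons]
  congr 1
  omega

theorem pvSliceHead {α : Type} (c : α) (cs : List α) (y : Int) (hy : 0 ≤ y) :
    PySem.List.slice (c :: cs) (some 0) (some (y + 1)) = c :: PySem.List.slice cs (some 0) (some y) := by
  rw [PySem.List.slice_toNat _ (by omega) (by omega), PySem.List.slice_toNat _ (by omega) hy]
  have h1 : (y + 1).toNat - (0 : Int).toNat = (y.toNat - (0 : Int).toNat) + 1 := by omega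
  rw [h1]
  simp [List.take_succ_cons]

-- the shifted zip of cut pairs slices the tail
theorem pvShift (c : Char) (cs : List Char) (xs ys : List Int)
    (hxs : ∀ x ∈ xs, -1 ≤ x) (hys : ∀ y ∈ ys, 0 ≤ y) :
    (List.zip (xs.map (· + 1)) (ys.map (· + 1))).map
      (fun ab => PySem.List.slice (c :: cs) (some (ab.1 + 1)) (some ab.2))
    = (List.zip xs ys).map (fun ab => PySem.List.slice cs (some (ab.1 + 1)) (some ab.2)) := by
  rw [List.zip_map, List.map_map]
  apply List.map_congr_left
  intro ab hab
  obtain ⟨ha, hb⟩ := List.of_mem_zip hab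
  have h1 : -1 ≤ ab.1 := hxs _ ha
  have h2 : 0 ≤ ab.2 := hys _ hb
  show PySem.List.slice (c :: cs) (some ((ab.1 + 1) + 1)) (some (ab.2 + 1)) = _
  exact pvSliceCons c cs (ab.1 + 1) ab.2 (by omega) h2

-- B's slices are exactly the reference split
theorem pvPartsBC (q : Char → Bool) (cs : List Char) : pvPartsC q cs = pvSplit q cs := by
  induction cs with
  | nil =>
    rw [pvPartsC, pvSplit]
    simp only [pvKs, PySem.List.enumerate_nil, List.filter_nil, List.map_nil, List.length_nil,
      Nat.cast_zero, List.nil_append, List.zip_cons_cons, List.zip_nil_right, List.map_cons,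
      List.map_nil]
    rw [PySem.List.slice_toNat _ (by omega) (by omega)]
    simp
  | cons c cs ih =>
    rcases hS : pvSplit q cs with _ | ⟨h, t⟩
    · exact absurd hS (pvSplit_ne_nil q cs)
    · have hn : ((c :: cs).length : Int) = (cs.length : Int) + 1 := by
        push_cast [List.length_cons]; ring
      have hysmem : ∀ y ∈ pvKs q cs ++ [(cs.length : Int)], 0 ≤ y := by
        intro y hy
        rcases List.mem_append.1 hy with h' | h'
        · exact pvKs_nonneg q cs y h'
        · simp at h'; omega
      have hkmem : ∀ x ∈ ((-1 : Int) :: pvKs q cs), -1 ≤ x := by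
        intro x hx
        rcases List.mem_cons.1 hx with rfl | hx
        · omega
        · have := pvKs_nonneg q cs x hx; omega
      have hkmem' : ∀ x ∈ pvKs q cs, -1 ≤ x := fun x hx => hkmem x (List.mem_cons_of_mem _ hx)
      rcases hys : pvKs q cs ++ [(cs.length : Int)] with _ | ⟨y, ys⟩
      · exact absurd hys (by simp)
      have hy0 : 0 ≤ y := hysmem y (by rw [hys]; simp)
      have hysmem' : ∀ b ∈ ys, 0 ≤ b := fun b hb => hysmem b (by rw [hys]; simp [hb])
      have hIH := ih
      rw [pvPartsC, hys, hS, List.zip_cons_cons, List.map_cons] at hIH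
      have hhead : PySem.List.slice cs (some (-1 + 1)) (some y) = h :=
        (List.cons_eq_cons.1 hIH).1
      have htail : (List.zip (pvKs q cs) ys).map
          (fun ab => PySem.List.slice cs (some (ab.1 + 1)) (some ab.2)) = t :=
        (List.cons_eq_cons.1 hIH).2
      by_cases hq : q c
      · have hsplit : pvSplit q (c :: cs) = [] :: h :: t := by
          rw [pvSplit, hS]; exact if_pos hq
        rw [pvPartsC, pvKs_cons, hsplit, hn]
        simp only [hq, if_pos, List.cons_append, List.nil_append]
        have hz : (List.map (· + 1) (pvKs q cs)) ++ [(cs.length : Int) + 1]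
            = List.map (· + 1) (pvKs q cs ++ [(cs.length : Int)]) := by simp
        rw [hz, List.zip_cons_cons, List.map_cons]
        have hz2 : ((0 : Int) :: List.map (· + 1) (pvKs q cs))
            = List.map (· + 1) ((-1 : Int) :: pvKs q cs) := by simp
        rw [hz2, pvShift c cs _ _ hkmem hysmem]
        rw [List.cons_eq_cons]
        refine ⟨?_, ?_⟩
        · rw [PySem.List.slice_toNat _ (by omega) (by omega)]
          simp
        · rw [hys, List.zip_cons_cons, List.map_cons, hhead, htail]
      · have hsplit : pvSplit q (c :: cs) = (c :: h) :: t := by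
          rw [pvSplit, hS]; exact if_neg (by simp [hq])
        rw [pvPartsC, pvKs_cons, hsplit, hn]
        simp only [hq, Bool.false_eq_true, if_false, List.nil_append]
        have hz : (List.map (· + 1) (pvKs q cs)) ++ [(cs.length : Int) + 1]
            = List.map (· + 1) (pvKs q cs ++ [(cs.length : Int)]) := by simp
        rw [hz, hys, List.map_cons, List.zip_cons_cons, List.map_cons]
        rw [pvShift c cs _ _ hkmem' hysmem', htail]
        rw [List.cons_eq_cons]
        refine ⟨?_, rfl⟩
        rw [show ((-1 : Int), y + 1).1 + 1 = (0 : Int) by norm_num]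
        rw [pvSliceHead c cs y hy0]
        rw [show ((-1 : Int) + 1) = (0 : Int) by norm_num] at hhead
        rw [hhead]

-- the separator test of B agrees with the membership test of A
theorem pvSepsEq (prefixs : List String) (c : Char) :
    PySem.Set.contains (PySem.Set.ofList (prefixs.filter (fun p => PySem.Str.len p == 1)))
      (String.singleton c) = prefixs.contains (String.singleton c) := by
  simp [PySem.Set.contains, PySem.Set.mem_ofList, List.mem_filter]

-- ===== VERDICT (by name: the statement is the Claim_ definition above) =====
theorem parser_path_spec : Claim_equal_parser_path := by
  intro content prefixs _
  show parser_path content prefixs = parser_path_alt content prefixs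
  simp only [parser_path, parser_path_alt]
  rw [pvFoldA prefixs content.toList [] ""]
  have hq : ∀ c : Char,
      PySem.Set.contains (PySem.Set.ofList (prefixs.filter (fun p => PySem.Str.len p == 1)))
        (String.singleton c) = prefixs.contains (String.singleton c) := pvSepsEq prefixs
  set q : Char → Bool := fun c => prefixs.contains (String.singleton c) with hqdef
  set cs := content.toList with hcs
  set L : List String := (pvSplit q cs).map String.ofList with hL
  have hLne : L ≠ [] := by
    rw [hL]; intro hnil
    exact pvSplit_ne_nil q cs (List.map_eq_nil_iff.1 hnil)
  -- identify B's parts with L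
  have h1 : ((PySem.List.enumerate cs).filter
      (fun ic => PySem.Set.contains
        (PySem.Set.ofList (prefixs.filter (fun p => PySem.Str.len p == 1)))
        (String.singleton ic.2))).map (fun ic => ic.1) = pvKs q cs := by
    rw [pvKs]; congr 1
    exact List.filter_congr (fun ic _ => hq ic.2)
  have h2 : ∀ Z : List (Int × Int), Z.map
      (fun ab => PySem.Str.slice content (some (ab.1 + 1)) (some ab.2))
      = (Z.map (fun ab => PySem.List.slice cs (some (ab.1 + 1)) (some ab.2))).map String.ofList := by
    intro Z
    rw [List.map_map]
    exact List.map_congr_left (fun ab _ => by simp [PySem.Str.slice, hcs, Function.comp])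
  have hlen : PySem.Str.len content = (cs.length : Int) := by
    rw [PySem.Str.len_eq, hcs]
  rw [h1, hlen, h2]
  rw [show (List.zip ((-1) :: pvKs q cs) (pvKs q cs ++ [(cs.length : Int)])).map
      (fun ab => PySem.List.slice cs (some (ab.1 + 1)) (some ab.2)) = pvPartsC q cs from rfl]
  rw [pvPartsBC, ← hL]
  -- both sides in terms of L
  rw [pvWithHd_empty, ← hL]
  simp only [List.nil_append]
  rw [PySem.List.pyGetD_neg_one _ _ hLne, pvGetLastD_eq_getLast L hLne ""]
  by_cases hstrip : PySem.Str.strip (L.getLast hLne) = ""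
  · simp [hstrip]
  · simp [hstrip, List.dropLast_append_getLast hLne]
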